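-- pv_equiv track=rewrite | github.com/sreeharshaparuchur1/16662_S26 | 16_662_HW3/SymPlanner.py | unify_all
-- ===== SOURCE A (Python) =====
-- from typing import List, Tuple, Dict, Optional, Iterable, Set
--
-- Predicate = Tuple[str, Tuple[str, ...]]   # e.g., ('at', ('robot','A'))
--
-- Subst = Dict[str, str]
--
-- def is_var(x: str) -> bool:
--     return isinstance(x, str) and x.startswith("?")
--
-- def substitute(pred: Predicate, subst: Subst) -> Predicate:
--     name, args = pred
--     return (name, tuple(subst.get(a, a) for a in args))
--
-- def unify(a: Predicate, b: Predicate, subst: Optional[Subst]=None) -> Optional[Subst]: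
--     """Unify predicate a (may contain vars) with ground predicate b (state fact)."""
--     if subst is None:
--         subst = {}
--     if a[0] != b[0] or len(a[1]) != len(b[1]):
--         return None
--     theta = dict(subst)
--     for av, bv in zip(a[1], b[1]):
--         if is_var(av):
--             if av in theta and theta[av] != bv:
--                 return None
--             theta[av] = bv
--         else:
--             if av != bv:
--                 return None
--     return theta
--
-- def unify_all(preconds: List[Predicate], state: Set[Predicate]) -> List[Subst]:
--     """All substitutions that satisfy all preconditions in the given ground state."""
--     sols = []
--     preconds = list(preconds)
--
--     def backtrack(i: int, theta: Subst):
--         if i == len(preconds):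
--             sols.append(theta.copy())
--             return
--         p = preconds[i]
--         for s in state:
--             if s[0] == p[0] and len(s[1]) == len(p[1]):
--                 new_theta = unify(substitute(p, theta), s, theta)
--                 if new_theta is not None:
--                     backtrack(i + 1, new_theta)
--
--     backtrack(0, {})
--     # Deduplicate
--     uniq, seen = [], set()
--     for th in sols:
--         key = tuple(sorted(th.items()))
--         if key not in seen:
--             seen.add(key)
--             uniq.append(th)
--     return uniq
-- ===== SOURCE B (Python) =====
-- def is_var(x):
--     return isinstance(x, str) and x.startswith("?")
--
-- def substitute(pred, subst):
--     name, args = pred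
--     return (name, tuple(subst.get(a, a) for a in args))
--
-- def unify(a, b, subst=None):
--     """Unify predicate a (may contain vars) with ground predicate b (state fact)."""
--     if subst is None:
--         subst = {}
--     if a[0] != b[0] or len(a[1]) != len(b[1]):
--         return None
--     theta = dict(subst)
--     for av, bv in zip(a[1], b[1]):
--         if is_var(av):
--             if av in theta and theta[av] != bv:
--                 return None
--             theta[av] = bv
--         else:
--             if av != bv:
--                 return None
--     return theta
--
-- def unify_all(preconds, state):
--     """All substitutions that satisfy all preconditions in the given ground state."""
--     preconds = list(preconds)
--     # index the state facts once by (name, arity)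
--     index = {}
--     for s in state:
--         index.setdefault((s[0], len(s[1])), []).append(s)
--     # iterative layer-by-layer product: one layer of substitutions per precondition
--     layer = [{}]
--     for p in preconds:
--         bucket = index.get((p[0], len(p[1])), [])
--         nxt = []
--         for theta in layer:
--             for s in bucket:
--                 nt = unify(substitute(p, theta), s, theta)
--                 if nt is not None:
--                     nxt.append(nt)
--         layer = nxt
--     # deduplicate, keeping first occurrences
--     uniq, seen = [], set()
--     for th in layer:
--         key = tuple(sorted(th.items()))
--         if key not in seen:
--             seen.add(key)
--             uniq.append(th)
--     return uniq
-- ===== Notes on version B (the rewrite author's own statement) =====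
-- stated objective: alternative
-- what changed: State facts are indexed once in a dict keyed by (name, arity) and the recursive backtracking with a callback is replaced by an iterative layer-by-layer product that scans only the matching bucket per precondition; it trades A's per-candidate name/arity guard over the whole state for a one-pass index.
import Mathlib
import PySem

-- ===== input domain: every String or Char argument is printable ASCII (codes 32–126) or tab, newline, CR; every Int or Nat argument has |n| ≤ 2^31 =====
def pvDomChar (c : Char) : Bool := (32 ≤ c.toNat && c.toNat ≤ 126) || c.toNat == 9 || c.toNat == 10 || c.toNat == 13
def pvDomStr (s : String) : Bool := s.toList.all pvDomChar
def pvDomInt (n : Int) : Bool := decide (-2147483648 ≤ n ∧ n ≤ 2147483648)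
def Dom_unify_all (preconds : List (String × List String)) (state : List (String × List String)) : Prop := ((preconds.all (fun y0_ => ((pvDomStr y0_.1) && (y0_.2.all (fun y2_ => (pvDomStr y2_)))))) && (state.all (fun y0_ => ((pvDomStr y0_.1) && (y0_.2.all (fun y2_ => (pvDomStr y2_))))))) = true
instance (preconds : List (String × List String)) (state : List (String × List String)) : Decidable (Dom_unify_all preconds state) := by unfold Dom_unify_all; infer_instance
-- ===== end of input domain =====

-- B indexes the state facts once in a dict keyed by (name, arity) and replaces the
-- recursive backtracking over the whole state by an iterative layer-by-layer product
-- over the matching bucket only (an alternative algorithm, similar measured cost);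
-- return values are proved identical.


-- ===== PORT A =====
-- shared module helpers (identical source in Source A and Source B)
def pvIsVar (x : String) : Bool := PySem.Str.startswith x "?"

def pvSubstitute (pred : String × List String) (subst : PySem.Dict String String) :
    String × List String :=
  (pred.1, pred.2.map (fun a => subst.getD a a))

-- the 'for av, bv in zip(a[1], b[1])' loop of unify (early 'return None' as Option)
def pvUnifyLoop (theta : PySem.Dict String String) :
    List (String × String) → Option (PySem.Dict String String)
  | [] => some theta
  | (av, bv) :: rest =>
    if pvIsVar av then
      if (match theta.get? av with | some w => !(w == bv) | none => false) then none
      else pvUnifyLoop (theta.insert av bv) rest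
    else
      if !(av == bv) then none
      else pvUnifyLoop theta rest

def pvUnify (a b : String × List String) (subst : PySem.Dict String String) :
    Option (PySem.Dict String String) :=
  if !(a.1 == b.1) || !(a.2.length == b.2.length) then none
  else pvUnifyLoop subst (a.2.zip b.2)

-- the final deduplication loop (identical in both Pythons)
def pvDedup (sols : List (PySem.Dict String String)) : List (PySem.Dict String String) :=
  (sols.foldl
    (fun (acc : List (PySem.Dict String String) × PySem.Set (List (String × String))) th =>
      let key := PySem.List.sorted2 th.items (fun x => x.1) (fun x => x.2)
      if key ∈ acc.2 then acc
      else (acc.1 ++ [th], PySem.Set.add acc.2 key))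
    ([], PySem.Set.empty)).1

-- A's recursive 'backtrack' (index i becomes recursion on the remaining preconds)
def pvBacktrack (state : List (String × List String)) :
    List (String × List String) → PySem.Dict String String → List (PySem.Dict String String)
  | [], theta => [theta]
  | p :: rest, theta =>
    state.foldl
      (fun sols s =>
        if s.1 == p.1 && s.2.length == p.2.length then
          match pvUnify (pvSubstitute p theta) s theta with
          | some nt => sols ++ pvBacktrack state rest nt
          | none => sols
        else sols)
      []

def unify_all (preconds : List (String × List String)) (state : List (String × List String)) :
    List (List (String × String)) :=
  (pvDedup (pvBacktrack state preconds PySem.Dict.empty)).map PySem.Dict.items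

-- ===== PORT B =====
-- index the state facts by (name, arity): dict built with setdefault(...).append(s)
def pvBuildIndex (state : List (String × List String)) :
    PySem.Dict (String × Nat) (List (String × List String)) :=
  state.foldl (fun d s => d.modify (s.1, s.2.length) [] (· ++ [s])) PySem.Dict.empty

-- one precondition: extend every substitution of the layer by every matching bucket fact
def pvStep (index : PySem.Dict (String × Nat) (List (String × List String)))
    (layer : List (PySem.Dict String String)) (p : String × List String) :
    List (PySem.Dict String String) :=
  let bucket := index.getD (p.1, p.2.length) []
  layer.foldl
    (fun nxt theta =>
      bucket.foldl
        (fun nxt s =>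
          match pvUnify (pvSubstitute p theta) s theta with
          | some nt => nxt ++ [nt]
          | none => nxt)
        nxt)
    []

def unify_all_alt (preconds : List (String × List String)) (state : List (String × List String)) :
    List (List (String × String)) :=
  let index := pvBuildIndex state
  let layer := preconds.foldl (fun layer p => pvStep index layer p) [PySem.Dict.empty]
  (pvDedup layer).map PySem.Dict.items

-- ===== PRECONDITION & SPEC =====
def Spec_unify_all (preconds : List (String × List String)) (state : List (String × List String)) (out : List (List (String × String))) : Prop := out = unify_all_alt preconds state
instance (preconds : List (String × List String)) (state : List (String × List String)) (out : List (List (String × String))) : Decidable (Spec_unify_all preconds state out) := by unfold Spec_unify_all; infer_instance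

-- ===== CLAIM (what is proved, stated in full; the proofs are below) =====
def Claim_equal_unify_all : Prop := ∀ (preconds : List (String × List String)) (state : List (String × List String)), Dom_unify_all preconds state → Spec_unify_all preconds state (unify_all preconds state)

-- ===== LEMMAS AND PROOFS =====

-- the bucket of (name, arity) is exactly the matching facts of the state, in order
theorem pvBuildIndex_getD (state : List (String × List String)) (key : String × Nat) :
    (pvBuildIndex state).getD key [] =
      state.filter (fun s => (s.1, s.2.length) == key) := by
  unfold pvBuildIndex
  rw [show (fun (d : PySem.Dict (String × Nat) (List (String × List String))) (s : String × List String) => d.modify (s.1, s.2.length) [] (· ++ [s]))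
      = (fun d s => (fun (d : PySem.Dict (String × Nat) (List (String × List String))) (p : (String × Nat) × (String × List String)) => d.modify p.1 [] (· ++ [p.2])) d ((fun s => ((s.1, s.2.length), s)) s)) from rfl]
  rw [← List.foldl_map (f := fun (s : String × List String) => ((s.1, s.2.length), s)) (g := fun (d : PySem.Dict (String × Nat) (List (String × List String))) p => d.modify p.1 [] (· ++ [p.2]))]
  rw [PySem.Dict.getD_foldl_modify_append]
  simp [List.filter_map, Function.comp_def]

-- A's guarded loop over the whole state, as a flatMap over the matching facts
theorem pvBacktrack_cons (state : List (String × List String))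
    (p : String × List String) (rest : List (String × List String))
    (theta : PySem.Dict String String) :
    pvBacktrack state (p :: rest) theta =
      (state.filter (fun s => (s.1, s.2.length) == (p.1, p.2.length))).flatMap
        (fun s =>
          match pvUnify (pvSubstitute p theta) s theta with
          | some nt => pvBacktrack state rest nt
          | none => []) := by
  show state.foldl _ [] = _
  rw [show (fun (s : String × List String) => (s.1, s.2.length) == (p.1, p.2.length))
      = (fun s => s.1 == p.1 && s.2.length == p.2.length) from rfl]
  rw [PySem.List.foldl_if_eq_foldl_filter]
  rw [show (fun (sols : List (PySem.Dict String String)) s =>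
        match pvUnify (pvSubstitute p theta) s theta with
        | some nt => sols ++ pvBacktrack state rest nt
        | none => sols)
      = (fun sols s => sols ++
          match pvUnify (pvSubstitute p theta) s theta with
          | some nt => pvBacktrack state rest nt
          | none => []) from funext fun sols => funext fun s => by
        cases pvUnify (pvSubstitute p theta) s theta <;> simp]
  rw [PySem.List.foldl_append_eq_flatMap]
  simp

-- B's double loop, as a flatMap over the layer
theorem pvStep_eq (index : PySem.Dict (String × Nat) (List (String × List String)))
    (layer : List (PySem.Dict String String)) (p : String × List String) :
    pvStep index layer p =
      layer.flatMap (fun theta =>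
        (index.getD (p.1, p.2.length) []).flatMap
          (fun s =>
            match pvUnify (pvSubstitute p theta) s theta with
            | some nt => [nt]
            | none => [])) := by
  unfold pvStep
  dsimp only
  rw [show (fun (nxt : List (PySem.Dict String String)) theta =>
        (index.getD (p.1, p.2.length) []).foldl
          (fun nxt s =>
            match pvUnify (pvSubstitute p theta) s theta with
            | some nt => nxt ++ [nt]
            | none => nxt)
          nxt)
      = (fun nxt theta => nxt ++
          (index.getD (p.1, p.2.length) []).flatMap
            (fun s =>
              match pvUnify (pvSubstitute p theta) s theta with
              | some nt => [nt]
              | none => []))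
      from funext fun nxt => funext fun theta => by
        rw [show (fun (nxt : List (PySem.Dict String String)) s =>
              match pvUnify (pvSubstitute p theta) s theta with
              | some nt => nxt ++ [nt]
              | none => nxt)
            = (fun nxt s => nxt ++
                match pvUnify (pvSubstitute p theta) s theta with
                | some nt => [nt]
                | none => []) from funext fun nxt => funext fun s => by
              cases pvUnify (pvSubstitute p theta) s theta <;> simp]
        rw [PySem.List.foldl_append_eq_flatMap]]
  rw [PySem.List.foldl_append_eq_flatMap]
  simp

-- the iterative layers compute exactly the solutions of A's DFS, in the same order
theorem pvLayers_eq (state : List (String × List String))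
    (ps : List (String × List String)) (layer : List (PySem.Dict String String)) :
    ps.foldl (fun layer p => pvStep (pvBuildIndex state) layer p) layer =
      layer.flatMap (pvBacktrack state ps) := by
  induction ps generalizing layer with
  | nil => simp [pvBacktrack]
  | cons p rest ih =>
    rw [List.foldl_cons, ih, pvStep_eq]
    rw [List.flatMap_assoc]
    refine congrArg (layer.flatMap ·) (funext fun theta => ?_)
    rw [pvBuildIndex_getD, pvBacktrack_cons, List.flatMap_assoc]
    refine congrArg (List.flatMap · (List.filter (fun s => (s.1, s.2.length) == (p.1, p.2.length)) state)) (funext fun s => ?_)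
    cases pvUnify (pvSubstitute p theta) s theta <;> simp

-- ===== VERDICT (by name: the statement is the Claim_ definition above) =====
theorem unify_all_spec : Claim_equal_unify_all := by
  intro preconds state _
  unfold Spec_unify_all unify_all unify_all_alt
  simp only [pvLayers_eq]
  simp [List.flatMap]
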